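-- pv_equiv track=rewrite | github.com/pittachiox/pittahomework_softwaretesting | homework4.py | lenIfValidResult
-- ===== SOURCE A (Python) =====
-- def lenIfValidResult(s, charA, charB):
--     last_char = None
--     count = 0
--     for char in s:
--         if char == charA or char == charB:
--             if char == last_char:
--                 return 0
--             count += 1
--             last_char = char
--     return count
-- ===== SOURCE B (Python) =====
-- def _summary(s, charA, charB):
--     # divide-and-conquer summary of the matched subsequence of s:
--     # (valid, count, first_matched_char, last_matched_char)
--     if len(s) == 0:
--         return (True, 0, None, None)
--     if len(s) == 1:
--         c = s[0]
--         if c == charA or c == charB: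
--             return (True, 1, c, c)
--         return (True, 0, None, None)
--     m = len(s) // 2
--     v1, n1, f1, l1 = _summary(s[:m], charA, charB)
--     v2, n2, f2, l2 = _summary(s[m:], charA, charB)
--     valid = v1 and v2 and not (l1 is not None and l1 == f2)
--     first = f1 if f1 is not None else f2
--     last = l2 if l2 is not None else l1
--     return (valid, n1 + n2, first, last)
--
-- def lenIfValidResult(s, charA, charB):
--     v, n, _, _ = _summary(s, charA, charB)
--     return n if v else 0
-- ===== Notes on version B (the rewrite author's own statement) =====
-- stated objective: alternative
-- what changed: Replaces A's single left-to-right scan carrying last_char and a running count (with an early return 0) by a divide-and-conquer: the string is split in half recursively, each half is summarized as (valid, count, first matched char, last matched char), and the two summaries are combined by checking a clash only at the seam.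
import Mathlib
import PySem

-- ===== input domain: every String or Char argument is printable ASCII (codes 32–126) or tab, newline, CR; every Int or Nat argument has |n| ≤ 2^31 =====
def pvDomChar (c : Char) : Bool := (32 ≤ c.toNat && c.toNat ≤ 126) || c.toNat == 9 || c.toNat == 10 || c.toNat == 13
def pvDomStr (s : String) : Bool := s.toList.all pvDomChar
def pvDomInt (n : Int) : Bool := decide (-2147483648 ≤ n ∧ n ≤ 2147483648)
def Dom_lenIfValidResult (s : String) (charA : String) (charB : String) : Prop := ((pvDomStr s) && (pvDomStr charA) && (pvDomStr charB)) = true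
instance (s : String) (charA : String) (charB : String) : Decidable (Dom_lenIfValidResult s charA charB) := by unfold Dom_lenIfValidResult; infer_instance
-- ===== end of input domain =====

-- B replaces A's single streaming scan (last_char + running count + early return) by a
-- divide-and-conquer over string halves combining (valid, count, first, last) summaries; alternative, same result.

-- ===== PORT A =====
-- A's for-loop: state (last_char, count), early `return 0` on a matched char equal to last_char.
def lenIfValidResultGo (charA charB : String) (last : Option Char) (count : Int) : List Char → Int
  | [] => count
  | c :: rest =>
    if String.ofList [c] == charA || String.ofList [c] == charB then
      if last == some c then 0
      else lenIfValidResultGo charA charB (some c) (count + 1) rest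
    else lenIfValidResultGo charA charB last count rest

def lenIfValidResult (s : String) (charA : String) (charB : String) : Int :=
  lenIfValidResultGo charA charB none 0 s.toList

-- ===== PORT B =====
-- the tuple (valid, count, first, last) returned by Source B's _summary
structure PVSum where
  valid : Bool
  count : Int
  first : Option Char
  last  : Option Char
deriving DecidableEq, Repr

-- `l1 is not None and l1 == f2`
def pvClash : Option Char → Option Char → Bool
  | some a, some b => a == b
  | _, _ => false

-- `x if x is not None else y`
def pvOr : Option Char → Option Char → Option Char
  | some a, _ => some a
  | none, b => b

-- combining step of _summary's two recursive results
def pvMerge (x y : PVSum) : PVSum :=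
  ⟨x.valid && y.valid && !(pvClash x.last y.first),
   x.count + y.count,
   pvOr x.first y.first,
   pvOr y.last x.last⟩

-- _summary: split at len // 2, recurse on both halves, merge (len // 2 on a nonnegative length: Nat division is exact here)
def pvSummary (charA charB : String) : List Char → PVSum
  | [] => ⟨true, 0, none, none⟩
  | [c] =>
    if String.ofList [c] == charA || String.ofList [c] == charB then ⟨true, 1, some c, some c⟩
    else ⟨true, 0, none, none⟩
  | c :: d :: rest =>
    pvMerge (pvSummary charA charB ((c :: d :: rest).take ((c :: d :: rest).length / 2)))
            (pvSummary charA charB ((c :: d :: rest).drop ((c :: d :: rest).length / 2)))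
termination_by cs => cs.length
decreasing_by
  · simp [List.length_take]; omega
  · simp; omega

def lenIfValidResult_alt (s : String) (charA : String) (charB : String) : Int :=
  let r := pvSummary charA charB s.toList
  if r.valid then r.count else 0

-- ===== PRECONDITION & SPEC =====
def Spec_lenIfValidResult (s : String) (charA : String) (charB : String) (out : Int) : Prop := out = lenIfValidResult_alt s charA charB
instance (s : String) (charA : String) (charB : String) (out : Int) : Decidable (Spec_lenIfValidResult s charA charB out) := by unfold Spec_lenIfValidResult; infer_instance

-- ===== CLAIM (what is proved, stated in full; the proofs are below) =====
def Claim_equal_lenIfValidResult : Prop := ∀ (s : String) (charA : String) (charB : String), Dom_lenIfValidResult s charA charB → Spec_lenIfValidResult s charA charB (lenIfValidResult s charA charB)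

-- ===== LEMMAS AND PROOFS =====
-- Linear reference fold: the summary computed left to right, one character at a time.
def pvStep (charA charB : String) (a : PVSum) (c : Char) : PVSum :=
  if String.ofList [c] == charA || String.ofList [c] == charB then
    ⟨a.valid && !(pvClash a.last (some c)), a.count + 1, pvOr a.first (some c), some c⟩
  else a

def pvE : PVSum := ⟨true, 0, none, none⟩

def pvF (charA charB : String) (cs : List Char) : PVSum := List.foldl (pvStep charA charB) pvE cs

-- well-formedness: first and last are none together
def pvWF (x : PVSum) : Prop := x.first = none ↔ x.last = none

lemma pvOr_ne_none (a : Option Char) (c : Char) : ¬ pvOr a (some c) = none := by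
  cases a <;> simp [pvOr]

lemma pvMerge_e_right (a : PVSum) : pvMerge a pvE = a := by
  obtain ⟨v, n, f, l⟩ := a
  cases f <;> cases l <;> simp [pvMerge, pvE, pvClash, pvOr]

lemma pvMerge_e_left (a : PVSum) : pvMerge pvE a = a := by
  obtain ⟨v, n, f, l⟩ := a
  cases f <;> cases l <;> simp [pvMerge, pvE, pvClash, pvOr]

lemma pvStep_wf (charA charB : String) (a : PVSum) (c : Char) (h : pvWF a) :
    pvWF (pvStep charA charB a c) := by
  unfold pvStep
  split_ifs with hc
  · simp [pvWF, pvOr_ne_none]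
  · exact h

lemma pvMerge_assoc (x y z : PVSum) (hy : pvWF y) :
    pvMerge (pvMerge x y) z = pvMerge x (pvMerge y z) := by
  obtain ⟨xv, xn, xf, xl⟩ := x
  obtain ⟨yv, yn, yf, yl⟩ := y
  obtain ⟨zv, zn, zf, zl⟩ := z
  simp only [pvWF] at hy
  cases yf with
  | none =>
    have : yl = none := hy.mp rfl
    subst this
    cases xf <;> cases xl <;> cases zf <;> cases zl <;>
      simp [pvMerge, pvClash, pvOr, Bool.and_assoc, Int.add_assoc]
  | some b =>
    cases yl with
    | none => simp at hy
    | some l =>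
      cases xf <;> cases xl <;> cases zf <;> cases zl <;>
        cases xv <;> cases yv <;> cases zv <;>
        simp [pvMerge, pvClash, pvOr, Int.add_assoc, Bool.and_comm]

lemma pvStep_eq_merge (charA charB : String) (a : PVSum) (c : Char) :
    pvStep charA charB a c = pvMerge a (pvStep charA charB pvE c) := by
  obtain ⟨v, n, f, l⟩ := a
  unfold pvStep
  split_ifs with hc
  · cases f <;> cases l <;> simp [pvMerge, pvE, pvClash, pvOr]
  · exact (pvMerge_e_right _).symm

lemma pvFoldl_merge (charA charB : String) :
    ∀ (cs : List Char) (a : PVSum),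
      List.foldl (pvStep charA charB) a cs = pvMerge a (pvF charA charB cs) := by
  intro cs
  induction cs with
  | nil => intro a; simp [pvF, List.foldl, pvMerge_e_right]
  | cons c rest ih =>
    intro a
    have hF : pvF charA charB (c :: rest) = pvMerge (pvStep charA charB pvE c) (pvF charA charB rest) :=
      ih (pvStep charA charB pvE c)
    calc List.foldl (pvStep charA charB) a (c :: rest)
        = List.foldl (pvStep charA charB) (pvStep charA charB a c) rest := rfl
      _ = pvMerge (pvStep charA charB a c) (pvF charA charB rest) := ih _
      _ = pvMerge (pvMerge a (pvStep charA charB pvE c)) (pvF charA charB rest) := by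
            rw [pvStep_eq_merge]
      _ = pvMerge a (pvMerge (pvStep charA charB pvE c) (pvF charA charB rest)) := by
            exact pvMerge_assoc _ _ _ (pvStep_wf charA charB pvE c (by simp [pvWF, pvE]))
      _ = pvMerge a (pvF charA charB (c :: rest)) := by rw [hF]

lemma pvF_append (charA charB : String) (xs ys : List Char) :
    pvF charA charB (xs ++ ys) = pvMerge (pvF charA charB xs) (pvF charA charB ys) := by
  simp only [pvF, List.foldl_append]
  exact pvFoldl_merge charA charB ys (pvF charA charB xs)

lemma pvSummary_eq_F_aux (charA charB : String) :
    ∀ (n : Nat) (cs : List Char), cs.length ≤ n → pvSummary charA charB cs = pvF charA charB cs := by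
  intro n
  induction n with
  | zero =>
    intro cs h
    have : cs = [] := List.eq_nil_of_length_eq_zero (Nat.le_zero.mp h)
    subst this
    simp [pvSummary, pvF, pvE, List.foldl]
  | succ n ih =>
    intro cs h
    match cs with
    | [] => simp [pvSummary, pvF, pvE, List.foldl]
    | [c] =>
      simp only [pvSummary, pvF, List.foldl, pvStep, pvE]
      split_ifs <;> rfl
    | c :: d :: rest =>
      rw [pvSummary,
        ih _ (by simp [List.length_take] at *; omega),
        ih _ (by simp at *; omega),
        ← pvF_append, List.take_append_drop]

lemma pvSummary_eq_F (charA charB : String) (cs : List Char) :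
    pvSummary charA charB cs = pvF charA charB cs :=
  pvSummary_eq_F_aux charA charB cs.length cs le_rfl

lemma pvGo_eq (charA charB : String) :
    ∀ (cs : List Char) (last : Option Char) (count : Int),
      lenIfValidResultGo charA charB last count cs =
        (if (pvF charA charB cs).valid && !(pvClash last (pvF charA charB cs).first)
         then count + (pvF charA charB cs).count else 0) := by
  intro cs
  induction cs with
  | nil =>
    intro last count
    cases last <;> simp [lenIfValidResultGo, pvF, List.foldl, pvE, pvClash]
  | cons c rest ih =>
    intro last count
    have hF : pvF charA charB (c :: rest) = pvMerge (pvStep charA charB pvE c) (pvF charA charB rest) :=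
      pvFoldl_merge charA charB rest (pvStep charA charB pvE c)
    by_cases hc : (String.ofList [c] == charA || String.ofList [c] == charB) = true
    · have hstep : pvStep charA charB pvE c = ⟨true, 1, some c, some c⟩ := by
        unfold pvStep
        rw [if_pos hc]
        rfl
      by_cases hl : (last == some c) = true
      · -- clash with last_char: A returns 0, and the merged summary's first is c
        have hcl : pvClash last (some c) = true := by
          cases last with
          | none => simp at hl
          | some l => simpa [pvClash] using hl
        simp only [lenIfValidResultGo, hc, if_true, hl, if_true]
        rw [hF, hstep]
        simp only [pvMerge, pvOr]
        simp [hcl]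
      · have hcl : pvClash last (some c) = false := by
          cases last with
          | none => simp [pvClash]
          | some l => simp [pvClash]; simpa using hl
        simp only [lenIfValidResultGo, hc, if_true, hl, Bool.false_eq_true, if_false]
        rw [ih (some c) (count + 1), hF, hstep]
        simp only [pvMerge, pvOr, hcl, Bool.true_and, Bool.not_false, Bool.and_true]
        split_ifs with h <;> omega
    · simp only [lenIfValidResultGo, hc, Bool.false_eq_true, if_false]
      rw [ih last count, hF]
      have : pvStep charA charB pvE c = pvE := by simp [pvStep, hc]
      rw [this, pvMerge_e_left]

-- ===== VERDICT (by name: the statement is the Claim_ definition above) =====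
theorem lenIfValidResult_spec : Claim_equal_lenIfValidResult := by
  intro s charA charB _
  unfold Spec_lenIfValidResult lenIfValidResult lenIfValidResult_alt
  rw [pvGo_eq, pvSummary_eq_F]
  simp [pvClash]
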